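-- pv_equiv track=rewrite | github.com/gregchapman-dev/converter21 | tests/Utilities.py | generateExpectedMaxTrack
-- ===== SOURCE A (Python) =====
-- def generateExpectedMaxTrack(tokens: [[str]], initialTrackCount: int) -> int:
--     currentTrackCount = initialTrackCount
--     expectedMaxTrack = currentTrackCount
--
--     for lineTokens in tokens:
--         for token in lineTokens:
--             if token == '*+':
--                 currentTrackCount += 1
--                 if currentTrackCount > expectedMaxTrack:
--                     expectedMaxTrack = currentTrackCount
--             elif token == '*-':
--                 currentTrackCount -= 1
--
--     return expectedMaxTrack
-- ===== SOURCE B (Python) =====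
-- def generateExpectedMaxTrack(tokens: [[str]], initialTrackCount: int) -> int:
--     # Divide-and-conquer: summarize token ranges by the monoid
--     # (net delta, max prefix sum >= 0); combine halves, answer = initial + peak.
--     flat = [t for line in tokens for t in line]
--
--     def summary(lo, hi):  # -> (delta, peak) over flat[lo:hi]; peak = max(0, all prefix sums)
--         if hi - lo == 1:
--             t = flat[lo]
--             d = 1 if t == '*+' else -1 if t == '*-' else 0
--             return d, max(d, 0)
--         if hi == lo:
--             return 0, 0
--         mid = (lo + hi) // 2
--         d1, p1 = summary(lo, mid)
--         d2, p2 = summary(mid, hi)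
--         return d1 + d2, max(p1, d1 + p2)
--
--     _, peak = summary(0, len(flat))
--     return initialTrackCount + peak
-- ===== Notes on version B (the rewrite author's own statement) =====
-- stated objective: alternative
-- what changed: B replaces A's single-pass conditional peak-tracking with a divide-and-conquer monoid summary (net delta, max prefix sum) over the flattened tokens, combining halves recursively; answer = initial + peak.
import Mathlib
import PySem

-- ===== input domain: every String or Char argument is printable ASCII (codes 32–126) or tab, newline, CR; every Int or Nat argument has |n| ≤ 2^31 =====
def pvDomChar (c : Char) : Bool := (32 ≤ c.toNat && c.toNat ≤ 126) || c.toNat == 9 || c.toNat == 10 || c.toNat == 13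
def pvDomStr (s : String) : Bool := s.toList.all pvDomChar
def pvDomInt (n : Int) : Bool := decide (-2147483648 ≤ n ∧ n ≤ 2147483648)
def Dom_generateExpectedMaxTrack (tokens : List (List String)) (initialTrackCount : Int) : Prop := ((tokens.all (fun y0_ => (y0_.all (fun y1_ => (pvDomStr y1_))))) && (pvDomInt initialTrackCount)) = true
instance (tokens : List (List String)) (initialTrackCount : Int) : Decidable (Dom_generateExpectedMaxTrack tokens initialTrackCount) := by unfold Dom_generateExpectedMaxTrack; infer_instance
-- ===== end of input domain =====

-- B replaces A's single-pass conditional peak-tracking with a divide-and-conquer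
-- monoid summary (net delta, max prefix sum) over the flattened tokens (same O(n) cost).


-- ===== PORT A =====
-- state = (currentTrackCount, expectedMaxTrack)
def pvStepA (st : Int × Int) (token : String) : Int × Int :=
  if token = "*+" then
    let cur := st.1 + 1
    (cur, if cur > st.2 then cur else st.2)
  else if token = "*-" then (st.1 - 1, st.2)
  else st

def generateExpectedMaxTrack (tokens : List (List String)) (initialTrackCount : Int) : Int :=
  (tokens.foldl (fun st lineTokens => lineTokens.foldl pvStepA st)
    (initialTrackCount, initialTrackCount)).2

-- ===== PORT B =====
-- Source B's summary(lo, hi) on flat[lo:hi], ported as recursion on the sublist itself: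
-- the index split mid = (lo+hi)//2 corresponds exactly to take/drop at length/2 of the
-- sublist, since (lo+hi)/2 - lo = (hi-lo)/2 for integers lo ≤ hi (exact correspondence).
def pvSummary (l : List String) : Int × Int :=
  match l with
  | [] => (0, 0)
  | [t] =>
      let d : Int := if t = "*+" then 1 else if t = "*-" then -1 else 0
      (d, max d 0)
  | t1 :: t2 :: rest =>
      let s1 := pvSummary ((t1 :: t2 :: rest).take ((t1 :: t2 :: rest).length / 2))
      let s2 := pvSummary ((t1 :: t2 :: rest).drop ((t1 :: t2 :: rest).length / 2))
      (s1.1 + s2.1, max s1.2 (s1.1 + s2.2))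
termination_by l.length
decreasing_by
  · simp [List.length_take]; omega
  · simp; omega

def generateExpectedMaxTrack_alt (tokens : List (List String)) (initialTrackCount : Int) : Int :=
  initialTrackCount + (pvSummary tokens.flatten).2

-- ===== PRECONDITION & SPEC =====
def Spec_generateExpectedMaxTrack (tokens : List (List String)) (initialTrackCount : Int) (out : Int) : Prop := out = generateExpectedMaxTrack_alt tokens initialTrackCount
instance (tokens : List (List String)) (initialTrackCount : Int) (out : Int) : Decidable (Spec_generateExpectedMaxTrack tokens initialTrackCount out) := by unfold Spec_generateExpectedMaxTrack; infer_instance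

-- ===== CLAIM =====
def Claim_equal_generateExpectedMaxTrack : Prop := ∀ (tokens : List (List String)) (initialTrackCount : Int), Dom_generateExpectedMaxTrack tokens initialTrackCount → Spec_generateExpectedMaxTrack tokens initialTrackCount (generateExpectedMaxTrack tokens initialTrackCount)

-- ===== LEMMAS AND PROOFS =====

-- invariant of the summary: the peak dominates the net delta and 0
theorem pvSummary_bounds (l : List String) :
    (pvSummary l).1 ≤ (pvSummary l).2 ∧ 0 ≤ (pvSummary l).2 := by
  induction l using pvSummary.induct with
  | case1 => simp [pvSummary]
  | case2 t => simp only [pvSummary]; split_ifs <;> simp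
  | case3 t1 t2 rest ih1 ih2 =>
      rw [pvSummary]
      simp only [List.length_cons] at *
      obtain ⟨a1, b1⟩ := ih1
      obtain ⟨a2, b2⟩ := ih2
      constructor <;> simp <;> omega

-- coupling lemma: A's fold from state (a, m) with a ≤ m yields exactly the
-- summary-combined state (net delta shifts the counter, the peak updates the max)
theorem pvFold_eq_summary (l : List String) :
    ∀ a m : Int, a ≤ m →
      l.foldl pvStepA (a, m) = (a + (pvSummary l).1, max m (a + (pvSummary l).2)) := by
  induction l using pvSummary.induct with
  | case1 => intro a m h; simp [pvSummary]; omega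
  | case2 t =>
      intro a m h
      simp only [pvSummary, List.foldl, pvStepA]
      split_ifs <;> simp_all <;> omega
  | case3 t1 t2 rest ih1 ih2 =>
      intro a m h
      have hsplit : t1 :: t2 :: rest =
          (t1 :: t2 :: rest).take ((t1 :: t2 :: rest).length / 2) ++
          (t1 :: t2 :: rest).drop ((t1 :: t2 :: rest).length / 2) := by simp
      have hb1 := pvSummary_bounds ((t1 :: t2 :: rest).take ((t1 :: t2 :: rest).length / 2))
      conv_lhs => rw [hsplit]
      rw [List.foldl_append]
      simp only [List.length_cons] at *
      rw [ih1 a m h,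
          ih2 _ _ (by omega)]
      rw [pvSummary]
      have hb2 := pvSummary_bounds ((t1 :: t2 :: rest).drop ((t1 :: t2 :: rest).length / 2))
      simp only [List.length_cons] at *
      rw [Prod.mk.injEq]
      constructor <;> omega

-- ===== VERDICT =====
theorem generateExpectedMaxTrack_spec : Claim_equal_generateExpectedMaxTrack := by
  intro tokens i _
  unfold Spec_generateExpectedMaxTrack generateExpectedMaxTrack generateExpectedMaxTrack_alt
  rw [← List.foldl_flatten, pvFold_eq_summary tokens.flatten i i le_rfl]
  have hb := pvSummary_bounds tokens.flatten
  simp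
  omega
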